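-- pv_equiv track=rewrite | github.com/judeWoo/moloco-korea | strings.py | equalsWhenOneCharRemoved
-- ===== SOURCE A (Python) =====
-- def equalsWhenOneCharRemoved(x, y):
--     if x == None or y == None or len(x) == len(y) or len(x)+1 < len(y) or len(y)+1 < len(x):
--         return False
--     if len(x) < len(y):
--         temp = x
--         x = y
--         y = temp
--     allowedOnce = True
--     j = 0
--     for i in range(len(x)):
--         if j < len(y) and x[i] != y[j]:
--             if not allowedOnce:
--                 return False
--             allowedOnce = False
--             continue
--         j+=1
--     return True
-- ===== SOURCE B (Python) =====
-- def equalsWhenOneCharRemoved(x, y):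
--     if x is None or y is None or abs(len(x) - len(y)) != 1:
--         return False
--     if len(x) < len(y):
--         x, y = y, x
--     return any(x[:i] + x[i+1:] == y for i in range(len(x)))
-- ===== Notes on version B (the rewrite author's own statement) =====
-- stated objective: simpler
-- what changed: Replaces the stateful two-pointer single-mismatch scan with a brute-force test that deleting some one character of the longer string yields the shorter one, using built-in string equality.
import Mathlib
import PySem

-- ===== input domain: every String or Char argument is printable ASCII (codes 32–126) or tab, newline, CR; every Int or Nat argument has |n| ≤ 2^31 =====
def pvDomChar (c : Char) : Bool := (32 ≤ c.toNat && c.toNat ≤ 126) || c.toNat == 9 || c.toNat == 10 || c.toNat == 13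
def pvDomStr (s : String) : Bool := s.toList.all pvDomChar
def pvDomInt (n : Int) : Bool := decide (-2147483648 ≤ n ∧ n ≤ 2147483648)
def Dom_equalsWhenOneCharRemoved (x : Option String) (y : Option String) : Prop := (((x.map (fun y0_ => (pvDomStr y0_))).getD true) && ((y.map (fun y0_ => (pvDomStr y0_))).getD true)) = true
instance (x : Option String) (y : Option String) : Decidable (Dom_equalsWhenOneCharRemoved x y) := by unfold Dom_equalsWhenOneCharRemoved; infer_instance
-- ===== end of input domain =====

-- B replaces A's stateful two-pointer single-mismatch scan with a brute-force
-- "some one-character deletion of the longer string equals the shorter one" test (simpler, not faster).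

-- ===== PORT A =====
-- A's for-loop over i with index j into y, the allowedOnce flag and the early
-- `return False`, transcribed as structural recursion on the remaining suffixes
-- of x and y (j is represented by the remaining suffix of y).
def eqOneLoop : List Char → List Char → Bool → Bool
  | [], _, _ => true
  | _ :: xs, [], allowed => eqOneLoop xs [] allowed          -- j < len(y) fails: j += 1
  | c :: xs, d :: yt, allowed =>
      if c ≠ d then
        if !allowed then false                               -- return False
        else eqOneLoop xs (d :: yt) false                     -- allowedOnce = False; continue
      else eqOneLoop xs yt allowed                            -- j += 1

def equalsWhenOneCharRemoved (x : Option String) (y : Option String) : Bool :=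
  match x, y with
  | none, _ => false
  | _, none => false
  | some a, some b =>
    let xs := a.toList
    let ys := b.toList
    if xs.length = ys.length ∨ xs.length + 1 < ys.length ∨ ys.length + 1 < xs.length then false
    else
      let p := if xs.length < ys.length then (ys, xs) else (xs, ys)
      eqOneLoop p.1 p.2 true

-- ===== PORT B =====
def equalsWhenOneCharRemoved_alt (x : Option String) (y : Option String) : Bool :=
  match x, y with
  | none, _ => false
  | _, none => false
  | some a, some b =>
    let xs := a.toList
    let ys := b.toList
    if ((xs.length : Int) - (ys.length : Int)).natAbs ≠ 1 then false
    else
      let p := if xs.length < ys.length then (ys, xs) else (xs, ys)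
      (List.range p.1.length).any (fun i => p.1.take i ++ p.1.drop (i+1) == p.2)

-- ===== PRECONDITION & SPEC =====
def Spec_equalsWhenOneCharRemoved (x : Option String) (y : Option String) (out : Bool) : Prop := out = equalsWhenOneCharRemoved_alt x y
instance (x : Option String) (y : Option String) (out : Bool) : Decidable (Spec_equalsWhenOneCharRemoved x y out) := by unfold Spec_equalsWhenOneCharRemoved; infer_instance

-- ===== CLAIM (what is proved, stated in full; the proofs are below) =====
def Claim_equal_equalsWhenOneCharRemoved : Prop := ∀ (x : Option String) (y : Option String), Dom_equalsWhenOneCharRemoved x y → Spec_equalsWhenOneCharRemoved x y (equalsWhenOneCharRemoved x y)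

-- ===== LEMMAS AND PROOFS =====

theorem pv_any_range_succ (n : Nat) (f : Nat → Bool) :
    (List.range (n+1)).any f = (f 0 || (List.range n).any (fun i => f (i+1))) := by
  rw [List.range_succ_eq_map]
  simp [List.any_map, Function.comp_def, Nat.succ_eq_add_one]

-- With the skip already spent, the loop is plain equality of the remainders.
theorem eqOneLoop_false (a b : List Char) (h : a.length = b.length) :
    eqOneLoop a b false = (a == b) := by
  induction a generalizing b with
  | nil => cases b with
    | nil => rfl
    | cons d yt => simp at h
  | cons c xs ih =>
    cases b with
    | nil => simp at h
    | cons d yt =>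
      simp only [eqOneLoop]
      by_cases hcd : c = d
      · subst hcd
        rw [if_neg (fun hne => hne rfl)]
        rw [ih yt (by simpa using h)]
        simp
      · rw [if_pos hcd]
        simp [hcd]

-- With the skip unspent and |a| = |b| + 1, the loop says: deleting some one
-- character of a yields b.
theorem eqOneLoop_true (a b : List Char) (h : a.length = b.length + 1) :
    eqOneLoop a b true =
      (List.range a.length).any (fun i => a.take i ++ a.drop (i+1) == b) := by
  induction a generalizing b with
  | nil => simp at h
  | cons c xs ih =>
    rw [List.length_cons, pv_any_range_succ]
    simp only [List.take_zero, List.nil_append, List.drop_succ_cons,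
      List.take_succ_cons, List.cons_append, List.drop_zero]
    cases b with
    | nil =>
      have hx : xs = [] := by
        cases xs with
        | nil => rfl
        | cons _ _ => simp at h
      subst hx
      rfl
    | cons d yt =>
      have hlen : xs.length = yt.length + 1 := by simpa using h
      simp only [eqOneLoop]
      by_cases hcd : c = d
      · subst hcd
        rw [if_neg (fun hne => hne rfl)]
        rw [ih yt hlen]
        simp only [List.cons_beq_cons, beq_self_eq_true, Bool.true_and]
        cases hx : (xs == c :: yt) with
        | false => simp
        | true =>
          have hxe : xs = c :: yt := by simpa using hx
          simp only [Bool.true_or]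
          subst hxe
          exact List.any_eq_true.mpr ⟨0, by simp, by simp⟩
      · rw [if_pos hcd, if_neg (by simp)]
        rw [eqOneLoop_false xs (d :: yt) (by simpa using h)]
        have hz : ∀ i ∈ List.range xs.length,
            ¬ ((c :: (xs.take i ++ xs.drop (i+1)) == d :: yt) = true) := by
          intro i _
          simp [hcd]
        rw [List.any_eq_false.mpr hz]
        simp

-- ===== VERDICT (by name: the statement is the Claim_ definition above) =====
theorem equalsWhenOneCharRemoved_spec : Claim_equal_equalsWhenOneCharRemoved := by
  unfold Claim_equal_equalsWhenOneCharRemoved Spec_equalsWhenOneCharRemoved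
  intro x y _
  match x, y with
  | none, none => rfl
  | none, some _ => rfl
  | some _, none => rfl
  | some a, some b =>
    simp only [equalsWhenOneCharRemoved, equalsWhenOneCharRemoved_alt]
    by_cases hg : a.toList.length = b.toList.length ∨ a.toList.length + 1 < b.toList.length ∨ b.toList.length + 1 < a.toList.length
    · rw [if_pos hg, if_pos (by omega)]
    · rw [if_neg hg]
      push Not at hg
      have hone : ¬ (((a.toList.length : Int) - (b.toList.length : Int)).natAbs ≠ 1) := by omega
      rw [if_neg hone]
      by_cases hlt : a.toList.length < b.toList.length
      · rw [if_pos hlt]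
        exact eqOneLoop_true b.toList a.toList (by omega)
      · rw [if_neg hlt]
        exact eqOneLoop_true a.toList b.toList (by omega)
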